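-- pv_equiv track=rewrite | github.com/wnghgpt/back_streamlit | utils/statistical_analyzer.py | split_name_and_side
-- ===== SOURCE A (Python) =====
-- from typing import List, Dict, Tuple
--
-- def split_name_and_side(full_name: str) -> Tuple[str, str]:
--     """이름에서 side 접미사(-left/-right/-center)를 분리하여 (base, side) 반환"""
--     if not isinstance(full_name, str):
--         return full_name, None
--     for s in ("left", "right", "center"):
--         suffix = f"-{s}"
--         if full_name.endswith(suffix):
--             return full_name[: -len(suffix)], s
--     return full_name, None
-- ===== SOURCE B (Python) =====
-- # B: a single backward character scan through a precomputed reversed-suffix trie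
-- # (state machine), instead of three separate endswith comparisons.
-- _TRIE = {}
-- for _s in ("left", "right", "center"):
--     _node = _TRIE
--     for _ch in reversed("-" + _s):
--         _node = _node.setdefault(_ch, {})
--     _node[None] = _s
--
--
-- def split_name_and_side(full_name):
--     """이름에서 side 접미사(-left/-right/-center)를 분리하여 (base, side) 반환"""
--     if not isinstance(full_name, str):
--         return full_name, None
--     node = _TRIE
--     i = len(full_name)
--     while i > 0 and full_name[i - 1] in node:
--         node = node[full_name[i - 1]]
--         i -= 1
--     side = node.get(None)
--     if side is not None:
--         return full_name[:i], side
--     return full_name, None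
-- ===== Notes on version B (the rewrite author's own statement) =====
-- stated objective: alternative
-- what changed: Replaces the loop of three endswith comparisons (one full suffix comparison per candidate) with a single backward character scan driven by a precomputed trie of the reversed suffixes (a small state machine), then one accept-state lookup.
import Mathlib
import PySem

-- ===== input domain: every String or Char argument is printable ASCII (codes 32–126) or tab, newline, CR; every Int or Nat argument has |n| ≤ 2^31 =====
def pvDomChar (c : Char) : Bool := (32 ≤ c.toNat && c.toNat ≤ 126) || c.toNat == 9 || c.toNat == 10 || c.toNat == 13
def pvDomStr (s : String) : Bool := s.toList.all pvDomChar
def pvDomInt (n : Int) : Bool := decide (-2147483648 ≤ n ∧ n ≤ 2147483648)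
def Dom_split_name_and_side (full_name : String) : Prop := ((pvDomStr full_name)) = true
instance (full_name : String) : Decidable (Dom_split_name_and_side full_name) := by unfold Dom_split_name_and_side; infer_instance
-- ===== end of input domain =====

-- B replaces A's three-iteration endswith scan by a single backward character scan
-- through a trie of the reversed suffixes (objective: alternative; values proved equal).

-- ===== PORT A =====
-- A's isinstance guard is vacuous for a String argument; the for-loop over the literal
-- tuple ("left", "right", "center") is unrolled into its three iterations, each doing
-- endswith("-" + s) and, on success, the negative slice full_name[:-len(suffix)].
def split_name_and_side (full_name : String) : String × Option String :=
  if PySem.Str.endswith full_name "-left" = true then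
    (PySem.Str.slice full_name none (some (-5)), some "left")
  else if PySem.Str.endswith full_name "-right" = true then
    (PySem.Str.slice full_name none (some (-6)), some "right")
  else if PySem.Str.endswith full_name "-center" = true then
    (PySem.Str.slice full_name none (some (-7)), some "center")
  else
    (full_name, none)

-- ===== PORT B =====
-- Source B builds, once at module load, a trie of the reversed suffixes "-left"/"-right"/
-- "-center" (nested dicts with a None accept key).  That fixed constant is ported as an
-- explicit transition function on node numbers (trieStep = the child-dict lookup,
-- trieAccept = node.get(None)); the node numbering is the trie's nodes:
--   root=0; 't'→1 ('r'→2); from 1: 'f'→3 / 'h'→4; tfel-: 3-'e'→5-'l'→6-'-'→7 (accept left);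
--   thgir-: 4-'g'→8-'i'→9-'r'→10-'-'→11 (accept right);
--   retnec-: 2-'e'→12-'t'→13-'n'→14-'e'→15-'c'→16-'-'→17 (accept center).
def trieStep (n : Nat) (c : Char) : Option Nat :=
  if n = 0 then if c = 't' then some 1 else if c = 'r' then some 2 else none
  else if n = 1 then if c = 'f' then some 3 else if c = 'h' then some 4 else none
  else if n = 2 then if c = 'e' then some 12 else none
  else if n = 3 then if c = 'e' then some 5 else none
  else if n = 4 then if c = 'g' then some 8 else none
  else if n = 5 then if c = 'l' then some 6 else none
  else if n = 6 then if c = '-' then some 7 else none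
  else if n = 8 then if c = 'i' then some 9 else none
  else if n = 9 then if c = 'r' then some 10 else none
  else if n = 10 then if c = '-' then some 11 else none
  else if n = 12 then if c = 't' then some 13 else none
  else if n = 13 then if c = 'n' then some 14 else none
  else if n = 14 then if c = 'e' then some 15 else none
  else if n = 15 then if c = 'c' then some 16 else none
  else if n = 16 then if c = '-' then some 17 else none
  else none

def trieAccept (n : Nat) : Option String :=
  if n = 7 then some "left" else if n = 11 then some "right"
  else if n = 17 then some "center" else none

-- Source B's while loop: scan full_name backwards (here: recurse over the reversed char
-- list) while the current trie node has a child for the char, decrementing i.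
def walkB : Nat → List Char → Nat → Nat × Nat
  | n, [], i => (n, i)
  | n, c :: rest, i =>
    match trieStep n c with
    | some m => walkB m rest (i - 1)
    | none => (n, i)

def split_name_and_side_alt (full_name : String) : String × Option String :=
  let res := walkB 0 full_name.toList.reverse full_name.toList.length
  match trieAccept res.1 with
  | some s => (String.ofList (full_name.toList.take res.2), some s)
  | none => (full_name, none)

-- ===== PRECONDITION & SPEC =====
def Spec_split_name_and_side (full_name : String) (out : String × Option String) : Prop := out = split_name_and_side_alt full_name
instance (full_name : String) (out : String × Option String) : Decidable (Spec_split_name_and_side full_name out) := by unfold Spec_split_name_and_side; infer_instance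

-- ===== CLAIM (what is proved, stated in full; the proofs are below) =====
def Claim_equal_split_name_and_side : Prop := ∀ (full_name : String), Dom_split_name_and_side full_name → Spec_split_name_and_side full_name (split_name_and_side full_name)

-- ===== LEMMAS AND PROOFS =====

lemma pv_clampIdx_neg (n k : Nat) (hk : 0 < k) :
    PySem.List.clampIdx n (-(k : Int)) = n - k := by
  unfold PySem.List.clampIdx
  split_ifs <;> omega

lemma pv_slice_neg (cs : List Char) (k : Nat) (hk : 0 < k) :
    PySem.List.slice cs none (some (-(k : Int))) = cs.take (cs.length - k) := by
  unfold PySem.List.slice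
  simp [pv_clampIdx_neg _ _ hk]

lemma pv_endswith_iff (s p : String) :
    PySem.Str.endswith s p = true ↔ p.toList <:+ s.toList := by
  simp [PySem.Str.endswith_eq, PySem.Chars.endswith_iff]

lemma trieStep_7 (c : Char) : trieStep 7 c = none := by simp [trieStep]
lemma trieStep_11 (c : Char) : trieStep 11 c = none := by simp [trieStep]
lemma trieStep_17 (c : Char) : trieStep 17 c = none := by simp [trieStep]

lemma walkB_stuck (n : Nat) (hn : ∀ c, trieStep n c = none) (r : List Char) (i : Nat) :
    walkB n r i = (n, i) := by
  cases r with
  | nil => rfl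
  | cons c rest => simp [walkB, hn c]

lemma walk_left (r : List Char) (i : Nat) :
    walkB 0 ('t' :: 'f' :: 'e' :: 'l' :: '-' :: r) i = (7, i - 5) := by
  simp [walkB, trieStep, walkB_stuck 7 trieStep_7]
  omega

lemma walk_right (r : List Char) (i : Nat) :
    walkB 0 ('t' :: 'h' :: 'g' :: 'i' :: 'r' :: '-' :: r) i = (11, i - 6) := by
  simp [walkB, trieStep, walkB_stuck 11 trieStep_11]
  omega

lemma walk_center (r : List Char) (i : Nat) :
    walkB 0 ('r' :: 'e' :: 't' :: 'n' :: 'e' :: 'c' :: '-' :: r) i = (17, i - 7) := by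
  simp [walkB, trieStep, walkB_stuck 17 trieStep_17]
  omega

-- If the reversed string starts with none of the three reversed suffixes, the walk
-- gets stuck strictly before any accept node.
lemma walk_no_accept (rcs : List Char) (i : Nat)
    (h1 : ∀ r, rcs ≠ 't' :: 'f' :: 'e' :: 'l' :: '-' :: r)
    (h2 : ∀ r, rcs ≠ 't' :: 'h' :: 'g' :: 'i' :: 'r' :: '-' :: r)
    (h3 : ∀ r, rcs ≠ 'r' :: 'e' :: 't' :: 'n' :: 'e' :: 'c' :: '-' :: r) :
    trieAccept (walkB 0 rcs i).1 = none := by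
  rcases rcs with _ | ⟨c1, rcs⟩
  · simp [walkB, trieAccept]
  by_cases h1t : c1 = 't'
  · subst h1t
    rcases rcs with _ | ⟨c2, rcs⟩
    · simp [walkB, trieStep, trieAccept]
    by_cases hf : c2 = 'f'
    · subst hf
      rcases rcs with _ | ⟨c3, rcs⟩
      · simp [walkB, trieStep, trieAccept]
      by_cases he : c3 = 'e'
      · subst he
        rcases rcs with _ | ⟨c4, rcs⟩
        · simp [walkB, trieStep, trieAccept]
        by_cases hl : c4 = 'l'
        · subst hl
          rcases rcs with _ | ⟨c5, rcs⟩
          · simp [walkB, trieStep, trieAccept]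
          by_cases hd : c5 = '-'
          · subst hd; exact absurd rfl (h1 rcs)
          · simp [walkB, trieStep, trieAccept, hd]
        · simp [walkB, trieStep, trieAccept, hl]
      · simp [walkB, trieStep, trieAccept, he]
    · by_cases hh : c2 = 'h'
      · subst hh
        rcases rcs with _ | ⟨c3, rcs⟩
        · simp [walkB, trieStep, trieAccept]
        by_cases hg : c3 = 'g'
        · subst hg
          rcases rcs with _ | ⟨c4, rcs⟩
          · simp [walkB, trieStep, trieAccept]
          by_cases hi : c4 = 'i'
          · subst hi
            rcases rcs with _ | ⟨c5, rcs⟩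
            · simp [walkB, trieStep, trieAccept]
            by_cases hr : c5 = 'r'
            · subst hr
              rcases rcs with _ | ⟨c6, rcs⟩
              · simp [walkB, trieStep, trieAccept]
              by_cases hd : c6 = '-'
              · subst hd; exact absurd rfl (h2 rcs)
              · simp [walkB, trieStep, trieAccept, hd]
            · simp [walkB, trieStep, trieAccept, hr]
          · simp [walkB, trieStep, trieAccept, hi]
        · simp [walkB, trieStep, trieAccept, hg]
      · simp [walkB, trieStep, trieAccept, hf, hh]
  · by_cases h1r : c1 = 'r'
    · subst h1r
      rcases rcs with _ | ⟨c2, rcs⟩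
      · simp [walkB, trieStep, trieAccept]
      by_cases he : c2 = 'e'
      · subst he
        rcases rcs with _ | ⟨c3, rcs⟩
        · simp [walkB, trieStep, trieAccept]
        by_cases ht : c3 = 't'
        · subst ht
          rcases rcs with _ | ⟨c4, rcs⟩
          · simp [walkB, trieStep, trieAccept]
          by_cases hn : c4 = 'n'
          · subst hn
            rcases rcs with _ | ⟨c5, rcs⟩
            · simp [walkB, trieStep, trieAccept]
            by_cases he2 : c5 = 'e'
            · subst he2
              rcases rcs with _ | ⟨c6, rcs⟩
              · simp [walkB, trieStep, trieAccept]
              by_cases hc : c6 = 'c'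
              · subst hc
                rcases rcs with _ | ⟨c7, rcs⟩
                · simp [walkB, trieStep, trieAccept]
                by_cases hd : c7 = '-'
                · subst hd; exact absurd rfl (h3 rcs)
                · simp [walkB, trieStep, trieAccept, hd]
              · simp [walkB, trieStep, trieAccept, hc]
            · simp [walkB, trieStep, trieAccept, he2]
          · simp [walkB, trieStep, trieAccept, hn]
        · simp [walkB, trieStep, trieAccept, ht]
      · simp [walkB, trieStep, trieAccept, he]
    · simp [walkB, trieStep, trieAccept, h1t, h1r]

-- A's positive branch equals B's value, given the walk lands on the accept node
-- having consumed the k suffix characters.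
lemma pv_pos (full_name : String) (k : Nat) (hk : 0 < k) (node : Nat) (s : String)
    (hacc : trieAccept node = some s)
    (hwalk : walkB 0 full_name.toList.reverse full_name.toList.length
             = (node, full_name.toList.length - k)) :
    (PySem.Str.slice full_name none (some (-(k : Int))), some s)
      = split_name_and_side_alt full_name := by
  simp only [split_name_and_side_alt]
  rw [hwalk]
  dsimp only
  rw [hacc]
  refine Prod.ext_iff.mpr ⟨?_, rfl⟩
  apply String.toList_inj.mp
  simp only [PySem.Str.toList_slice, PySem.Chars.slice_eq_listSlice, String.toList_ofList]
  exact pv_slice_neg _ _ hk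

-- ===== VERDICT (by name: the statement is the Claim_ definition above) =====
theorem split_name_and_side_spec : Claim_equal_split_name_and_side := by
  intro full_name _
  unfold Spec_split_name_and_side
  unfold split_name_and_side
  by_cases hL : PySem.Str.endswith full_name "-left" = true
  · rw [if_pos hL]
    obtain ⟨t, ht⟩ := (pv_endswith_iff _ _).mp hL
    have hrev : full_name.toList.reverse = 't' :: 'f' :: 'e' :: 'l' :: '-' :: t.reverse := by
      rw [← ht]; simp
    refine pv_pos full_name 5 (by norm_num) 7 "left" (by decide) ?_
    rw [hrev, walk_left, ← ht]
  · rw [if_neg hL]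
    by_cases hR : PySem.Str.endswith full_name "-right" = true
    · rw [if_pos hR]
      obtain ⟨t, ht⟩ := (pv_endswith_iff _ _).mp hR
      have hrev : full_name.toList.reverse
          = 't' :: 'h' :: 'g' :: 'i' :: 'r' :: '-' :: t.reverse := by
        rw [← ht]; simp
      refine pv_pos full_name 6 (by norm_num) 11 "right" (by decide) ?_
      rw [hrev, walk_right, ← ht]
    · rw [if_neg hR]
      by_cases hC : PySem.Str.endswith full_name "-center" = true
      · rw [if_pos hC]
        obtain ⟨t, ht⟩ := (pv_endswith_iff _ _).mp hC
        have hrev : full_name.toList.reverse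
            = 'r' :: 'e' :: 't' :: 'n' :: 'e' :: 'c' :: '-' :: t.reverse := by
          rw [← ht]; simp
        refine pv_pos full_name 7 (by norm_num) 17 "center" (by decide) ?_
        rw [hrev, walk_center, ← ht]
      · rw [if_neg hC]
        have hna := walk_no_accept full_name.toList.reverse full_name.toList.length
          (fun r hr => hL ((pv_endswith_iff _ _).mpr
            ⟨r.reverse, by have := congrArg List.reverse hr; simpa using this.symm⟩))
          (fun r hr => hR ((pv_endswith_iff _ _).mpr
            ⟨r.reverse, by have := congrArg List.reverse hr; simpa using this.symm⟩))
          (fun r hr => hC ((pv_endswith_iff _ _).mpr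
            ⟨r.reverse, by have := congrArg List.reverse hr; simpa using this.symm⟩))
        simp only [split_name_and_side_alt]
        rw [hna]
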